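-- pv_equiv track=rewrite | github.com/TrellixVulnTeam/paragon_JM5V | main/include/sent.py | allcap_differential
-- ===== SOURCE A (Python) =====
-- def allcap_differential(words):
--
--     is_different = False
--     allcap_words = 0
--     for word in words:
--         if word.isupper():
--             allcap_words += 1
--     cap_differential = len(words) - allcap_words
--     if cap_differential > 0 and cap_differential < len(words):
--         is_different = True
--     return is_different
-- ===== SOURCE B (Python) =====
-- def allcap_differential(words):
--     return any(w.isupper() for w in words) and any(not w.isupper() for w in words)
-- ===== Notes on version B (the rewrite author's own statement) =====
-- stated objective: idiomatic
-- what changed: Replaces the counting loop plus length-differential arithmetic with two short-circuiting existence checks: return True iff both an all-caps word and a non-all-caps word are present.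
import Mathlib
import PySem

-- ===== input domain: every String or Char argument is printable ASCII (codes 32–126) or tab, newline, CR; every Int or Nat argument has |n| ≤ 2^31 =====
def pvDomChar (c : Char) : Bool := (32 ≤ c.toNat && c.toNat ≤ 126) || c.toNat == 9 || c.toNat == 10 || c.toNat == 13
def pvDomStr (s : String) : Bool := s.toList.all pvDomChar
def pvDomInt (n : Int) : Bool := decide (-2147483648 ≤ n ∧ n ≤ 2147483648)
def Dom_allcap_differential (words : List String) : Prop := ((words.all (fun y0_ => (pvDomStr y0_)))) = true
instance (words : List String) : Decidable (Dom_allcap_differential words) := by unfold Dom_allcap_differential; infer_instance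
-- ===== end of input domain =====

-- B replaces A's counting loop + length-differential arithmetic with two existence checks (idiomatic; same cost).


-- ===== PORT A =====
-- str.isupper(): at least one cased character and no lowercase one (exact on ASCII)
def pyStrIsupper (s : String) : Bool :=
  s.toList.any (fun c => PySem.Chars.isupper c || PySem.Chars.islower c) &&
  s.toList.all (fun c => !PySem.Chars.islower c)

def allcap_differential (words : List String) : Bool :=
  let is_different := false
  let allcap_words : Int := words.foldl (fun n word => if pyStrIsupper word then n + 1 else n) 0
  let cap_differential : Int := (words.length : Int) - allcap_words
  let is_different := if cap_differential > 0 ∧ cap_differential < (words.length : Int) then true else is_different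
  is_different

-- ===== PORT B =====
def allcap_differential_alt (words : List String) : Bool :=
  words.any (fun w => pyStrIsupper w) && words.any (fun w => !pyStrIsupper w)

-- ===== PRECONDITION & SPEC =====
def Spec_allcap_differential (words : List String) (out : Bool) : Prop := out = allcap_differential_alt words
instance (words : List String) (out : Bool) : Decidable (Spec_allcap_differential words out) := by unfold Spec_allcap_differential; infer_instance

-- ===== CLAIM (what is proved, stated in full; the proofs are below) =====
def Claim_equal_allcap_differential : Prop := ∀ (words : List String), Dom_allcap_differential words → Spec_allcap_differential words (allcap_differential words)

-- ===== LEMMAS AND PROOFS =====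
theorem foldl_count_isupper (words : List String) (i : Int) :
    words.foldl (fun n word => if pyStrIsupper word then n + 1 else n) i
      = i + (words.countP (fun w => pyStrIsupper w) : Int) := by
  induction words generalizing i with
  | nil => simp
  | cons w ws ih =>
    simp only [List.foldl_cons, List.countP_cons, ih]
    by_cases h : pyStrIsupper w = true
    · simp [h]; omega
    · simp [h]

-- ===== VERDICT (by name: the statement is the Claim_ definition above) =====
theorem allcap_differential_spec : Claim_equal_allcap_differential := by
  intro words _
  show allcap_differential words = allcap_differential_alt words
  simp only [allcap_differential, allcap_differential_alt, foldl_count_isupper, zero_add]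
  have hsum : words.length = words.countP (fun w => pyStrIsupper w)
      + words.countP (fun w => !pyStrIsupper w) := by
    rw [List.length_eq_countP_add_countP (p := fun w => pyStrIsupper w)]
    congr 1
    apply List.countP_congr; intro a _; simp
  have h1 : words.any (fun w => pyStrIsupper w) = true
      ↔ 0 < words.countP (fun w => pyStrIsupper w) := by
    rw [List.countP_pos_iff, List.any_eq_true]
  have h2 : words.any (fun w => !pyStrIsupper w) = true
      ↔ 0 < words.countP (fun w => !pyStrIsupper w) := by
    rw [List.countP_pos_iff, List.any_eq_true]
  rw [Bool.eq_iff_iff, Bool.and_eq_true, h1, h2]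
  split_ifs with h
  · simp only [true_iff]; omega
  · simp only [false_iff]; omega
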